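-- pv_equiv track=rewrite | github.com/shhuan1989/algorithms | topcoder/SRM 722/TCPhoneHomeEasy.py | validNumbers
-- ===== SOURCE A (Python) =====
-- def validNumbers(digits, specialPrefixes):
--
--     if digits <= 0:
--         return 0
--
--     sp = set()
--     for a in specialPrefixes:
--         for b in specialPrefixes:
--             if a != b and a.find(b) == 0:
--                 sp.add(a)
--
--     specialPrefixes = {p for p in specialPrefixes} - sp
--
--     ans = 10 ** digits
--     for p in specialPrefixes:
--         ans -= 10 ** (digits-len(p))
--
--
--
--
--
--
--     return ans
-- ===== SOURCE B (Python) =====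
-- def validNumbers(digits, specialPrefixes):
--     if digits <= 0:
--         return 0
--     sp = set(specialPrefixes)
--     ans = 10 ** digits
--     for p in sp:
--         if all(p[:k] not in sp for k in range(len(p))):
--             ans -= 10 ** (digits - len(p))
--     return ans
-- ===== Notes on version B (the rewrite author's own statement) =====
-- stated objective: faster
-- what changed: A compares every pair of prefixes (a,b) to discard prefixes that extend another; B puts the prefixes in a set once and, for each distinct prefix, tests its proper prefixes p[:k] for set membership, removing the quadratic pairwise scan.
-- outside the precondition, e.g. on validNumbers(1, ['22']): A returns 9.9, B returns 9.9
import Mathlib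
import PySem

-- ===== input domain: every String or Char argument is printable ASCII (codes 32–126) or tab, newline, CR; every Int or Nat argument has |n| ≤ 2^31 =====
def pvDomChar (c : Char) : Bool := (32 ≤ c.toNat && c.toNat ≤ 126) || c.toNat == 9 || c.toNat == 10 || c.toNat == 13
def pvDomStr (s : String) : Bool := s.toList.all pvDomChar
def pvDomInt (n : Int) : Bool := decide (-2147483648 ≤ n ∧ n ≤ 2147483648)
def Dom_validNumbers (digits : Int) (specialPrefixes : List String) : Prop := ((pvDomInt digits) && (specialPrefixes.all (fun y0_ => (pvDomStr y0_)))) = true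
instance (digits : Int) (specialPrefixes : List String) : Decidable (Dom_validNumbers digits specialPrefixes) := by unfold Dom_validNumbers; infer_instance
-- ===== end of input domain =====

-- B replaces A's O(n^2) pairwise prefix scan by a set of all prefixes queried for each string's
-- proper prefixes (objective: faster for many prefixes). Equivalence is about the return value.

-- ===== PORT A =====
-- 10 ** e is ported as 10 ^ e.toNat; exact on Pre_ (there every exponent is ≥ 0 — Python
-- returns a float, not an int, when a kept prefix is longer than digits; Pre_ excludes that).
def validNumbers (digits : Int) (specialPrefixes : List String) : Int :=
  if digits ≤ 0 then 0
  else
    let sp : PySem.Set String := specialPrefixes.foldl (fun acc a =>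
      specialPrefixes.foldl (fun acc2 b =>
        if a ≠ b ∧ PySem.Str.find a b = 0 then PySem.Set.add acc2 a else acc2) acc)
      PySem.Set.empty
    let keep : PySem.Set String := PySem.Set.diff (PySem.Set.ofList specialPrefixes) sp
    keep.foldl (fun ans p => ans - 10 ^ (digits - (PySem.Str.len p : Int)).toNat)
      (10 ^ digits.toNat)

-- ===== PORT B =====
def validNumbers_alt (digits : Int) (specialPrefixes : List String) : Int :=
  if digits ≤ 0 then 0
  else
    let sp : PySem.Set String := PySem.Set.ofList specialPrefixes
    sp.foldl (fun ans p =>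
      if (List.range (PySem.Str.len p).toNat).all
          (fun k => !(PySem.Set.contains sp (PySem.Str.slice p none (some (k : Int))))) then
        ans - 10 ^ (digits - (PySem.Str.len p : Int)).toNat
      else ans) (10 ^ digits.toNat)

-- ===== PRECONDITION & SPEC =====
-- Pre_ excludes inputs where digits > 0 and some prefix with no other list element as a proper
-- prefix is longer than digits: there Python's 10 ** (digits - len(p)) makes A return a float,
-- not an int of the declared return type.
def Pre_validNumbers (digits : Int) (specialPrefixes : List String) : Prop :=
  digits ≤ 0 ∨ ∀ p ∈ specialPrefixes,
    (¬ ∃ b ∈ specialPrefixes, b ≠ p ∧ PySem.Str.startswith p b = true) →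
    ((p.toList.length : Int) ≤ digits)
instance (digits : Int) (specialPrefixes : List String) : Decidable (Pre_validNumbers digits specialPrefixes) := by unfold Pre_validNumbers; infer_instance
def pvWitness_validNumbers : Int × List String := (2, ["1", "12", "0"])
def Spec_validNumbers (digits : Int) (specialPrefixes : List String) (out : Int) : Prop := out = validNumbers_alt digits specialPrefixes
instance (digits : Int) (specialPrefixes : List String) (out : Int) : Decidable (Spec_validNumbers digits specialPrefixes out) := by unfold Spec_validNumbers; infer_instance

-- ===== CLAIM (what is proved, stated in full; the proofs are below) =====
def Claim_equal_validNumbers : Prop := ∀ (digits : Int) (specialPrefixes : List String), Dom_validNumbers digits specialPrefixes → Pre_validNumbers digits specialPrefixes → Spec_validNumbers digits specialPrefixes (validNumbers digits specialPrefixes)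

-- ===== LEMMAS AND PROOFS =====


-- A's removal condition for a string a: some other element of the list is found at index 0 in a.
abbrev pvBad (sps : List String) (a : String) : Prop :=
  ∃ b ∈ sps, a ≠ b ∧ PySem.Str.find a b = 0

lemma pv_find_zero_iff (s sub : List Char) : PySem.Chars.find s sub = 0 ↔ sub <+: s := by
  constructor
  · intro h
    have hs := PySem.Chars.find_spec (s := s) (sub := sub) (by rw [h])
    rw [h] at hs
    simpa using hs.1
  · intro hp
    have hn : 0 ≤ PySem.Chars.find s sub :=
      (PySem.Chars.find_nonneg_iff s sub).mpr hp.isInfix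
    obtain ⟨-, hmin⟩ := PySem.Chars.find_spec hn
    by_contra hne
    have h0 : 0 < (PySem.Chars.find s sub).toNat := by omega
    exact hmin 0 h0 (by simpa using hp)

lemma pv_inner_fold (a : String) (l : List String) (acc : PySem.Set String) :
    l.foldl (fun acc2 b =>
        if a ≠ b ∧ PySem.Str.find a b = 0 then PySem.Set.add acc2 a else acc2) acc
      = if pvBad l a then PySem.Set.add acc a else acc := by
  induction l generalizing acc with
  | nil => simp [pvBad]
  | cons b bs ih =>
    simp only [List.foldl_cons]
    by_cases hb : a ≠ b ∧ PySem.Str.find a b = 0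
    · rw [if_pos hb, ih]
      have hmem : a ∈ PySem.Set.add acc a := (PySem.Set.mem_add acc a a).mpr (Or.inr rfl)
      by_cases hbs : pvBad bs a
      · rw [if_pos hbs, PySem.Set.add_of_mem hmem,
          if_pos ⟨b, List.mem_cons_self, hb⟩]
      · rw [if_neg hbs, if_pos ⟨b, List.mem_cons_self, hb⟩]
    · rw [if_neg hb, ih]
      by_cases hbs : pvBad bs a
      · obtain ⟨c, hc, hcc⟩ := hbs
        rw [if_pos ⟨c, hc, hcc⟩, if_pos ⟨c, List.mem_cons_of_mem _ hc, hcc⟩]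
      · rw [if_neg hbs, if_neg (by
          rintro ⟨c, hc, hcc⟩
          rcases List.mem_cons.mp hc with rfl | hc'
          · exact hb hcc
          · exact hbs ⟨c, hc', hcc⟩)]

lemma pv_outer_mem (sps l : List String) (acc : PySem.Set String) (x : String) :
    x ∈ l.foldl (fun acc a => sps.foldl (fun acc2 b =>
        if a ≠ b ∧ PySem.Str.find a b = 0 then PySem.Set.add acc2 a else acc2) acc) acc
      ↔ x ∈ acc ∨ (x ∈ l ∧ pvBad sps x) := by
  induction l generalizing acc with
  | nil => simp
  | cons a as ih =>
    rw [List.foldl_cons, pv_inner_fold]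
    simp only [List.mem_cons]
    by_cases h : pvBad sps a
    · rw [if_pos h, ih, PySem.Set.mem_add]
      constructor
      · rintro ((hx | rfl) | ⟨hx, hbad⟩)
        · exact Or.inl hx
        · exact Or.inr ⟨Or.inl rfl, h⟩
        · exact Or.inr ⟨Or.inr hx, hbad⟩
      · rintro (hx | ⟨(rfl | hx), hbad⟩)
        · exact Or.inl (Or.inl hx)
        · exact Or.inl (Or.inr rfl)
        · exact Or.inr ⟨hx, hbad⟩
    · rw [if_neg h, ih]
      constructor
      · rintro (hx | ⟨hx, hbad⟩)
        · exact Or.inl hx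
        · exact Or.inr ⟨Or.inr hx, hbad⟩
      · rintro (hx | ⟨(rfl | hx), hbad⟩)
        · exact Or.inl hx
        · exact absurd hbad h
        · exact Or.inr ⟨hx, hbad⟩

lemma pv_foldl_sub (l : List String) (f : String → Int) (init : Int) :
    l.foldl (fun a x => a - f x) init = init - (l.map f).sum := by
  induction l generalizing init with
  | nil => simp
  | cons a as ih => simp [ih]; omega

lemma pv_foldl_sub_if (l : List String) (c : String → Bool) (f : String → Int) (init : Int) :
    l.foldl (fun a x => if c x then a - f x else a) init
      = init - ((l.filter c).map f).sum := by
  induction l generalizing init with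
  | nil => simp
  | cons a as ih =>
    by_cases hc : c a <;> simp [List.filter_cons, hc, ih] <;> omega

lemma pv_cond_iff (sps : List String) (p : String) :
    ((List.range (PySem.Str.len p).toNat).all
        (fun k => !(PySem.Set.contains (PySem.Set.ofList sps)
            (PySem.Str.slice p none (some (k : Int)))))) = true
      ↔ ¬ pvBad sps p := by
  have hlen : (PySem.Str.len p).toNat = p.toList.length := by
    simp [PySem.Str.len_eq]
  rw [List.all_eq_true]
  constructor
  · rintro h ⟨b, hb, hne, hf⟩
    have hpre : b.toList <+: p.toList := by
      rw [PySem.Str.find_eq] at hf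
      exact (pv_find_zero_iff _ _).mp hf
    have hlt : b.toList.length < p.toList.length := by
      rcases lt_or_eq_of_le hpre.length_le with h' | h'
      · exact h'
      · exact absurd (String.toList_inj.mp (List.IsPrefix.eq_of_length hpre h')) (Ne.symm hne)
    have hk : b.toList.length ∈ List.range (PySem.Str.len p).toNat :=
      List.mem_range.mpr (by omega)
    have hsl : PySem.Str.slice p none (some ((b.toList.length : Nat) : Int)) = b := by
      apply String.toList_inj.mp
      rw [PySem.Str.toList_slice]
      simp only [PySem.Chars.slice_eq_listSlice, PySem.List.slice_to_natCast]
      exact (List.prefix_iff_eq_take.mp hpre).symm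
    have := h b.toList.length hk
    rw [hsl] at this
    simp only [Bool.not_eq_true', Bool.not_eq_true] at this
    rw [← Bool.not_eq_true, PySem.Set.contains_iff, PySem.Set.mem_ofList] at this
    exact this hb
  · intro h k hk
    simp only [Bool.not_eq_true']
    rw [← Bool.not_eq_true, PySem.Set.contains_iff, PySem.Set.mem_ofList]
    intro hmem
    have hklt : k < p.toList.length := by
      have := List.mem_range.mp hk; omega
    set b := PySem.Str.slice p none (some (k : Int)) with hbdef
    have hbt : b.toList = p.toList.take k := by
      rw [hbdef, PySem.Str.toList_slice]
      simp [PySem.List.slice_to_natCast]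
    have hpre : b.toList <+: p.toList := by rw [hbt]; exact List.take_prefix _ _
    have hblen : b.toList.length = k := by rw [hbt, List.length_take]; omega
    refine h ⟨b, hmem, ?_, ?_⟩
    · intro he
      have hpl := hblen
      rw [← he] at hpl
      omega
    · rw [PySem.Str.find_eq]
      exact (pv_find_zero_iff _ _).mpr hpre

-- ===== VERDICT (by name: the statement is the Claim_ definition above) =====
theorem validNumbers_spec : Claim_equal_validNumbers := by
  intro digits sps _ _
  unfold Spec_validNumbers validNumbers validNumbers_alt
  by_cases hd : digits ≤ 0
  · rw [if_pos hd, if_pos hd]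
  · rw [if_neg hd, if_neg hd]
    simp only []
    rw [pv_foldl_sub, pv_foldl_sub_if]
    congr 2
    have hdiff : PySem.Set.diff (PySem.Set.ofList sps)
        (sps.foldl (fun acc a => sps.foldl (fun acc2 b =>
            if a ≠ b ∧ PySem.Str.find a b = 0 then PySem.Set.add acc2 a else acc2) acc)
          PySem.Set.empty)
        = (PySem.Set.ofList sps).filter (fun x => !(PySem.Set.contains
            (sps.foldl (fun acc a => sps.foldl (fun acc2 b =>
              if a ≠ b ∧ PySem.Str.find a b = 0 then PySem.Set.add acc2 a else acc2) acc)
            PySem.Set.empty) x)) := by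
      simp [PySem.Set.diff]
    rw [hdiff]
    apply congrArg
    apply List.filter_congr
    intro x hx
    have hxs : x ∈ sps := (PySem.Set.mem_ofList sps x).mp hx
    have hsp : x ∈ sps.foldl (fun acc a => sps.foldl (fun acc2 b =>
        if a ≠ b ∧ PySem.Str.find a b = 0 then PySem.Set.add acc2 a else acc2) acc)
        PySem.Set.empty ↔ pvBad sps x := by
      rw [pv_outer_mem]
      simp [PySem.Set.empty, hxs]
    rw [Bool.eq_iff_iff]
    rw [pv_cond_iff]
    simp only [Bool.not_eq_true', ← Bool.not_eq_true, PySem.Set.contains_iff]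
    rw [hsp]
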